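-- pv_equiv track=rewrite | github.com/bioinformatics-007/EpitopeFinder | new_module/esmfold.py | find_linker_positions
-- ===== SOURCE A (Python) =====
-- def find_linker_positions(sequence: str, linker: str) -> str:
--     """
--     Find residue numbers (1-based) where linker sequence appears.
--     Returns comma-separated list for PyMOL resi selection.
--     """
--     positions = []
--     linker_len = len(linker)
--     for i in range(len(sequence) - linker_len + 1):
--         if sequence[i:i+linker_len] == linker:
--             # Starting residue number (1-based)
--             start_res = i + 1
--             # Add all residues of this linker instance
--             for j in range(linker_len):
--                 positions.append(str(start_res + j))
--     return ",".join(positions) if positions else "none"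
-- ===== SOURCE B (Python) =====
-- def find_linker_positions(sequence: str, linker: str) -> str:
--     """
--     Find residue numbers (1-based) where linker sequence appears.
--     Returns comma-separated list for PyMOL resi selection.
--     """
--     m = len(linker)
--     if m == 0:
--         return "none"
--     res = []
--     base = 0
--     suffix = sequence
--     while True:
--         k = suffix.find(linker)
--         if k == -1:
--             break
--         start = base + k  # 0-based position of this match in sequence
--         res.extend(str(start + 1 + j) for j in range(m))
--         suffix = suffix[k + 1:]
--         base = start + 1
--     return ",".join(res) if res else "none"
-- ===== Notes on version B (the rewrite author's own statement) =====
-- stated objective: faster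
-- what changed: B replaces A's per-index slice-and-compare scan (building a fresh length-m slice for every start position) by repeated C-level str.find calls on ever-shorter suffixes, jumping directly from one occurrence to the next.
import Mathlib
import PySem

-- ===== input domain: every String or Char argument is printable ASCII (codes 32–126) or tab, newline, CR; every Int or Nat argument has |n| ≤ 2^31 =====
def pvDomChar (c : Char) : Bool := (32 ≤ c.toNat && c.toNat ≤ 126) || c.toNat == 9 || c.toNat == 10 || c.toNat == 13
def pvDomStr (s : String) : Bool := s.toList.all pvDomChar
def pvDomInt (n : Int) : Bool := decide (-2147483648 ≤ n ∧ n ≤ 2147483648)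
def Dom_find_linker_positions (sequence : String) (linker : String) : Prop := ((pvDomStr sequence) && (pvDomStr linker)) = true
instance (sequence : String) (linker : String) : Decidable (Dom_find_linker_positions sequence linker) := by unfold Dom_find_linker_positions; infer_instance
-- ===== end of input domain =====

-- B replaces A's per-index slice comparison by repeated first-occurrence search (str.find)
-- on ever-shorter suffixes; objective: faster (constant-factor, measured).

-- ===== PORT A =====
def find_linker_positions (sequence : String) (linker : String) : String :=
  -- positions = []; linker_len = len(linker)
  let linker_len : Int := PySem.Str.len linker
  -- for i in range(len(sequence) - linker_len + 1): if sequence[i:i+linker_len] == linker: for j in range(linker_len): positions.append(str(i+1+j))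
  let positions : List String :=
    (PySem.List.pyRange 0 (PySem.Str.len sequence - linker_len + 1)).foldl
      (fun positions i =>
        if PySem.Str.slice sequence (some i) (some (i + linker_len)) == linker then
          (PySem.List.pyRange 0 linker_len).foldl
            (fun positions j => positions ++ [PySem.Int.toStr ((i + 1) + j)]) positions
        else positions) []
  -- return ",".join(positions) if positions else "none"
  if positions.isEmpty then "none" else PySem.Str.join "," positions

-- ===== PORT B =====
-- the while loop of B: k = suffix.find(linker); stop on -1, else emit the residues of the
-- match at base+k and continue in suffix[k+1:]  (the 'lnk = []' test only makes the
-- recursion total; B's caller never reaches it since it returns "none" for an empty linker)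
def pvBLoop (lnk : List Char) (suffix : List Char) (base : Nat) (acc : List String) : List String :=
  if _hl : lnk = [] then acc
  else
    let k := PySem.Chars.find suffix lnk
    if hf : k = -1 then acc
    else
      pvBLoop lnk (suffix.drop (k.toNat + 1)) (base + k.toNat + 1)
        (acc ++ (PySem.List.pyRange 0 (lnk.length : Int)).map
          (fun j => PySem.Int.toStr (((base + k.toNat : Nat) : Int) + 1 + j)))
  termination_by suffix.length
  decreasing_by
    have hnn : 0 ≤ PySem.Chars.find suffix lnk := by
      have := PySem.Chars.neg_one_le_find suffix lnk
      omega
    have hpre := (PySem.Chars.find_spec hnn).1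
    have hne : suffix.drop (PySem.Chars.find suffix lnk).toNat ≠ [] := by
      intro h0; rw [h0] at hpre
      exact _hl (List.prefix_nil.mp hpre)
    have hlt : (PySem.Chars.find suffix lnk).toNat < suffix.length := by
      by_contra h
      exact hne (List.drop_eq_nil_of_le (by omega))
    simp [List.length_drop]; omega

def find_linker_positions_alt (sequence : String) (linker : String) : String :=
  let m : Int := PySem.Str.len linker
  if m == 0 then "none"
  else
    let res := pvBLoop linker.toList sequence.toList 0 []
    if res.isEmpty then "none" else PySem.Str.join "," res

-- ===== PRECONDITION & SPEC =====
def Spec_find_linker_positions (sequence : String) (linker : String) (out : String) : Prop := out = find_linker_positions_alt sequence linker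
instance (sequence : String) (linker : String) (out : String) : Decidable (Spec_find_linker_positions sequence linker out) := by unfold Spec_find_linker_positions; infer_instance

-- ===== CLAIM (what is proved, stated in full; the proofs are below) =====
def Claim_equal_find_linker_positions : Prop := ∀ (sequence : String) (linker : String), Dom_find_linker_positions sequence linker → Spec_find_linker_positions sequence linker (find_linker_positions sequence linker)

-- ===== LEMMAS AND PROOFS =====

def pvM (s lnk : List Char) : List Nat :=
  (List.range (s.length + 1 - lnk.length)).filter (fun i => decide (lnk <+: s.drop i))

def pvRes (m i : Nat) : List String :=
  (List.range m).map (fun (j : Nat) => PySem.Int.toStr ((i : Int) + 1 + (j : Int)))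

def pvL (sequence linker : String) : List String :=
  (pvM sequence.toList linker.toList).flatMap (pvRes linker.toList.length)

theorem pv_foldl_if_append {α β : Type} (p : α → Bool) (g : α → List β) (l : List α) (acc : List β) :
    l.foldl (fun acc x => if p x then acc ++ g x else acc) acc = acc ++ (l.filter p).flatMap g := by
  induction l generalizing acc with
  | nil => simp
  | cons a l ih =>
    by_cases h : p a = true <;> simp [h, ih, List.append_assoc]

theorem pv_str_len (s : String) : PySem.Str.len s = (s.toList.length : Int) := by
  simp [PySem.Str.len]

theorem pv_pyRange_nonpos {a : Int} (h : a ≤ 0) : PySem.List.pyRange 0 a = [] := by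
  simp [PySem.List.pyRange]; omega

theorem pv_cond_eq (sequence linker : String) (i : Nat) :
    (PySem.Str.slice sequence (some (i : Int)) (some ((i : Int) + (linker.toList.length : Int))) == linker)
      = decide (linker.toList <+: sequence.toList.drop i) := by
  have h1 : PySem.Str.slice sequence (some (i : Int)) (some ((i : Int) + (linker.toList.length : Int))) = linker
      ↔ linker.toList <+: sequence.toList.drop i := by
    constructor
    · intro h
      have h2 := congrArg String.toList h
      simp only [PySem.Str.toList_slice, PySem.Chars.slice_eq_listSlice] at h2
      rw [show ((i : Int) + (linker.toList.length : Int)) = ((i + linker.toList.length : Nat) : Int) by push_cast; ring,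
          PySem.List.slice_natCast,
          show i + linker.toList.length - i = linker.toList.length by omega] at h2
      rw [List.prefix_iff_eq_take]
      exact h2.symm
    · intro h
      apply String.ext
      simp only [PySem.Str.toList_slice, PySem.Chars.slice_eq_listSlice]
      rw [show ((i : Int) + (linker.toList.length : Int)) = ((i + linker.toList.length : Nat) : Int) by push_cast; ring,
          PySem.List.slice_natCast,
          show i + linker.toList.length - i = linker.toList.length by omega]
      exact (List.prefix_iff_eq_take.mp h).symm
  rw [Bool.eq_iff_iff]
  simp only [beq_iff_eq, decide_eq_true_eq]
  exact h1

theorem pv_res_eq (m i : Nat) :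
    (PySem.List.pyRange 0 (m : Int)).map (fun j => PySem.Int.toStr (((i : Nat) : Int) + 1 + j)) = pvRes m i := by
  rw [PySem.List.pyRange_zero_natCast, List.map_map, pvRes]
  rfl

theorem pv_A_eq (sequence linker : String) :
    find_linker_positions sequence linker =
      (if (pvL sequence linker).isEmpty then "none" else PySem.Str.join "," (pvL sequence linker)) := by
  unfold find_linker_positions
  rw [pv_str_len, pv_str_len]
  dsimp only
  have hrange : PySem.List.pyRange 0 ((sequence.toList.length : Int) - (linker.toList.length : Int) + 1)
      = (List.range (sequence.toList.length + 1 - linker.toList.length)).map (fun (k : Nat) => (k : Int)) := by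
    by_cases hmn : linker.toList.length ≤ sequence.toList.length
    · rw [show ((sequence.toList.length : Int) - (linker.toList.length : Int) + 1)
          = ((sequence.toList.length + 1 - linker.toList.length : Nat) : Int) by push_cast; omega]
      exact PySem.List.pyRange_zero_natCast _
    · rw [show sequence.toList.length + 1 - linker.toList.length = 0 by omega]
      rw [pv_pyRange_nonpos (by omega : (sequence.toList.length : Int) - (linker.toList.length : Int) + 1 ≤ 0)]
      simp
  rw [hrange, List.foldl_map]
  rw [PySem.List.foldl_congr_mem _ _
    (fun (acc : List String) (i : Nat) =>
      if decide (linker.toList <+: sequence.toList.drop i) then acc ++ pvRes linker.toList.length i else acc) _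
    (by
      intro acc i _
      rw [PySem.List.foldl_append_singleton_eq_map, pv_cond_eq, pv_res_eq])]
  rw [pv_foldl_if_append, List.nil_append]
  rfl

theorem pv_M_nil {s lnk : List Char} (h : ¬ lnk <:+: s) : pvM s lnk = [] := by
  unfold pvM
  rw [List.filter_eq_nil_iff]
  intro i _
  simp only [decide_eq_true_eq]
  intro hp
  exact h (hp.isInfix.trans (List.drop_suffix i s).isInfix)

theorem pv_M_cons {s lnk : List Char} (hl : lnk ≠ []) (hnn : 0 ≤ PySem.Chars.find s lnk) :
    pvM s lnk = (PySem.Chars.find s lnk).toNat ::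
      (pvM (s.drop ((PySem.Chars.find s lnk).toNat + 1)) lnk).map
        (fun i => (PySem.Chars.find s lnk).toNat + 1 + i) := by
  obtain ⟨hpre, hmin⟩ := PySem.Chars.find_spec hnn
  have hlen : lnk.length ≤ s.length - (PySem.Chars.find s lnk).toNat := by
    have := hpre.length_le
    simpa using this
  have hkn : (PySem.Chars.find s lnk).toNat < s.length := by
    by_contra hh
    have hz : s.drop (PySem.Chars.find s lnk).toNat = [] := List.drop_eq_nil_of_le (by omega)
    rw [hz] at hpre
    exact hl (List.prefix_nil.mp hpre)
  have hm1 : 1 ≤ lnk.length := List.length_pos_of_ne_nil hl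
  unfold pvM
  rw [show s.length + 1 - lnk.length
      = ((PySem.Chars.find s lnk).toNat + 1) + ((s.drop ((PySem.Chars.find s lnk).toNat + 1)).length + 1 - lnk.length) by
    simp [List.length_drop]; omega]
  rw [List.range_add, List.filter_append,
      show (PySem.Chars.find s lnk).toNat + 1 = (PySem.Chars.find s lnk).toNat.succ from rfl,
      List.range_succ, List.filter_append]
  rw [show (List.range (PySem.Chars.find s lnk).toNat).filter (fun i => decide (lnk <+: s.drop i)) = [] by
    rw [List.filter_eq_nil_iff]
    intro i hi
    simp only [decide_eq_true_eq]
    exact fun hp => hmin i (List.mem_range.mp hi) hp]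
  rw [show ([(PySem.Chars.find s lnk).toNat]).filter (fun i => decide (lnk <+: s.drop i))
      = [(PySem.Chars.find s lnk).toNat] by simp [hpre]]
  rw [List.filter_map]
  simp only [List.nil_append, List.cons_append]
  congr 1
  rw [List.filter_congr (fun i _ => by
    show decide (lnk <+: s.drop ((PySem.Chars.find s lnk).toNat + 1 + i)) = decide (lnk <+: (s.drop ((PySem.Chars.find s lnk).toNat + 1)).drop i)
    rw [List.drop_drop])]

theorem pv_loop_eq (lnk : List Char) (hl : lnk ≠ []) :
    ∀ (N : Nat) (suffix : List Char), suffix.length ≤ N → ∀ (base : Nat) (acc : List String),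
      pvBLoop lnk suffix base acc
        = acc ++ (pvM suffix lnk).flatMap (fun i => pvRes lnk.length (base + i)) := by
  intro N
  induction N with
  | zero =>
    intro suffix hs base acc
    have hsz : suffix = [] := List.eq_nil_of_length_eq_zero (by omega)
    subst hsz
    rw [pvBLoop, dif_neg hl]
    have hf : PySem.Chars.find [] lnk = -1 := by
      rw [PySem.Chars.find_eq_neg_one_iff]
      intro h
      exact hl (List.infix_nil.mp h)
    rw [dif_pos hf, pv_M_nil (by intro h; exact hl (List.infix_nil.mp h))]
    simp
  | succ N ih =>
    intro suffix hs base acc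
    rw [pvBLoop, dif_neg hl]
    by_cases hf : PySem.Chars.find suffix lnk = -1
    · rw [dif_pos hf, pv_M_nil ((PySem.Chars.find_eq_neg_one_iff _ _).mp hf)]
      simp
    · rw [dif_neg hf]
      have hnn : 0 ≤ PySem.Chars.find suffix lnk := by
        have := PySem.Chars.neg_one_le_find suffix lnk
        omega
      rw [ih _ (by simp [List.length_drop]; omega)]
      rw [pv_M_cons hl hnn]
      simp only [List.flatMap_cons, List.flatMap_map]
      rw [← List.append_assoc]
      congr 1
      · congr 1
        exact pv_res_eq lnk.length (base + (PySem.Chars.find suffix lnk).toNat)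
      · congr 1
        funext i
        congr 1
        omega

theorem pv_final (sequence linker : String) :
    find_linker_positions sequence linker = find_linker_positions_alt sequence linker := by
  rw [pv_A_eq]
  unfold find_linker_positions_alt
  rw [pv_str_len]
  dsimp only
  by_cases hm : linker.toList = []
  · have hL : pvL sequence linker = [] := by
      unfold pvL
      rw [List.flatMap_eq_nil_iff]
      intro x _
      simp [pvRes, hm]
    rw [hL, if_pos (show ((linker.toList.length : Int) == 0) = true by simp [hm])]
    rfl
  · have h0 : ¬ ((linker.toList.length : Int) == 0) = true := by
      simp only [beq_iff_eq, Nat.cast_eq_zero, List.length_eq_zero_iff]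
      exact hm
    rw [if_neg h0]
    rw [pv_loop_eq linker.toList hm sequence.toList.length sequence.toList le_rfl 0 []]
    simp only [List.nil_append, Nat.zero_add]
    rfl

-- ===== VERDICT (by name: the statement is the Claim_ definition above) =====
theorem find_linker_positions_spec : Claim_equal_find_linker_positions := by
  intro sequence linker _
  unfold Spec_find_linker_positions
  exact pv_final sequence linker
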